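-- pv_equiv track=rewrite | github.com/alexchristy/SSA-Document-Analyzer | cell_parsing_utils.py | ocr_combo_correction
-- ===== SOURCE A (Python) =====
-- import itertools
-- from typing import Dict, List, Optional, Union, cast
--
-- def ocr_combo_correction(input_str: str, correction_map: Dict[str, str]) -> List[str]:
--     """Correct OCR errors in a string by generating all possible combinations of corrections.
--
--     Args:
--     ----
--         input_str (str): The input string to correct.
--         correction_map (Dict[str, str]): A dictionary mapping OCR errors to their corrected values.
--
--     Returns:
--     -------
--         List[str]: A list of all possible corrected versions of the input string.
--
--     """
--     input_str = input_str.replace("TDB", "TBD")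
--     possibilities = []
--     for i, char in enumerate(input_str):
--         # Special case: replace '8' if it's between 'T' and 'D'
--         if char == "8" and i > 0 and i < len(input_str) - 1:
--             prev_char = input_str[i - 1].upper()
--             next_char = input_str[i + 1].upper()
--             if prev_char == "T" and next_char == "D":
--                 possibilities.append(["B"])
--                 continue
--         # Special case: keep 'B' if it's between 'T' and 'D'
--         elif char.upper() == "B" and i > 0 and i < len(input_str) - 1:
--             prev_char = input_str[i - 1].upper()
--             next_char = input_str[i + 1].upper()
--             if prev_char == "T" and next_char == "D":
--                 possibilities.append([char])
--                 continue
--         # General case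
--         possibilities.append([correction_map.get(char, char), char])
--
--     return ["".join(p) for p in itertools.product(*possibilities)]
-- ===== SOURCE B (Python) =====
-- def ocr_combo_correction(input_str, correction_map):
--     s = input_str.replace("TDB", "TBD")
--     # fixed[i] is the forced replacement at position i (the T_D special cases), else None
--     fixed = []
--     for prev, ch, nxt in zip([None] + list(s), s, list(s[1:]) + [None]):
--         if prev is not None and nxt is not None and prev.upper() == "T" and nxt.upper() == "D" \
--                 and (ch == "8" or ch.upper() == "B"):
--             fixed.append("B" if ch == "8" else ch)
--         else:
--             fixed.append(None)
--     # every free position contributes exactly 2 choices, so there are 2**g outputs;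
--     # output i is obtained directly by decoding the bits of i (low bit = rightmost free position)
--     g = fixed.count(None)
--     out = []
--     for k in range(2 ** g):
--         pieces = []
--         for ch, f in reversed(list(zip(s, fixed))):
--             if f is not None:
--                 pieces.append(f)
--             else:
--                 pieces.append(ch if k & 1 else correction_map.get(ch, ch))
--                 k >>= 1
--         out.append("".join(reversed(pieces)))
--     return out
-- ===== Notes on version B (the rewrite author's own statement) =====
-- stated objective: alternative
-- what changed: Instead of building a per-character choice table and taking its cartesian product, B counts the g free positions (each contributing exactly 2 choices) and generates the i-th output string directly by decoding the bits of i over the string, low bit at the rightmost free position; no choice table and no product is materialised.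
import Mathlib
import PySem

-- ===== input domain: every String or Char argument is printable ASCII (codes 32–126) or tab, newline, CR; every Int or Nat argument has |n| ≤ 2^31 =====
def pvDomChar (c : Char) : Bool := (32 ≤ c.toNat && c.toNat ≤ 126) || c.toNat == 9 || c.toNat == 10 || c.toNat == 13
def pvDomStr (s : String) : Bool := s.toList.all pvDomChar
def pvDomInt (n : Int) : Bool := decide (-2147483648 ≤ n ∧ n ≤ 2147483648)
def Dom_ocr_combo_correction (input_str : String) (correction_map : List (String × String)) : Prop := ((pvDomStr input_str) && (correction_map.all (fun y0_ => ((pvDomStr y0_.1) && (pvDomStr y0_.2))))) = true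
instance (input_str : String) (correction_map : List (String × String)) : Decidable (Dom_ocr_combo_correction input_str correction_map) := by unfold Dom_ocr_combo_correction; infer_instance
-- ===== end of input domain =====

-- B replaces the choice-table + cartesian-product generation by direct mixed-radix (bit) decoding:
-- it counts the g free positions, and produces the i-th output string directly from the bits of i.

-- correction_map.get(char, char): first matching key wins (assoc-list convention), as a char list
def pvMapGet (correction_map : List (String × String)) (ch : Char) : List Char :=
  match correction_map.find? (fun p => p.1 == String.mk [ch]) with
  | some p => p.2.toList
  | none => [ch]

-- ===== PORT A =====
def ocr_combo_correction (input_str : String) (correction_map : List (String × String)) : List String :=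
  let s := PySem.Chars.replace input_str.toList "TDB".toList "TBD".toList
  let possibilities : List (List (List Char)) :=
    (PySem.List.enumerate s 0).foldl (fun poss ic =>
      let i := ic.1
      let ch := ic.2
      if ch == '8' && decide (0 < i) && decide (i < (s.length : Int) - 1) then
        if PySem.Chars.upperChar (PySem.List.pyGetD s (i - 1) ' ') == 'T' &&
           PySem.Chars.upperChar (PySem.List.pyGetD s (i + 1) ' ') == 'D' then
          poss ++ [[['B']]]
        else poss ++ [[pvMapGet correction_map ch, [ch]]]
      else if PySem.Chars.upperChar ch == 'B' && decide (0 < i) && decide (i < (s.length : Int) - 1) then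
        if PySem.Chars.upperChar (PySem.List.pyGetD s (i - 1) ' ') == 'T' &&
           PySem.Chars.upperChar (PySem.List.pyGetD s (i + 1) ' ') == 'D' then
          poss ++ [[[ch]]]
        else poss ++ [[pvMapGet correction_map ch, [ch]]]
      else poss ++ [[pvMapGet correction_map ch, [ch]]]) []
  (possibilities.foldr (fun choices acc => choices.flatMap (fun c => acc.map (fun r => c ++ r))) [[]]).map String.mk

-- ===== PORT B =====
-- the forced replacement at a position (the T_D special cases), else none; body of Source B's first loop
def pvFixOf (prev : Option Char) (c : Char) (nxt : Option Char) : Option Char :=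
  if (prev.any (fun p => PySem.Chars.upperChar p == 'T')) &&
     (nxt.any (fun q => PySem.Chars.upperChar q == 'D')) &&
     (c == '8' || PySem.Chars.upperChar c == 'B') then
    some (if c == '8' then 'B' else c)
  else none

def ocr_combo_correction_alt (input_str : String) (correction_map : List (String × String)) : List String :=
  let s := PySem.Chars.replace input_str.toList "TDB".toList "TBD".toList
  let fixed : List (Option Char) :=
    ((none :: s.map some).zip (s.zip ((s.drop 1).map some ++ [none]))).map
      (fun t => pvFixOf t.1 t.2.1 t.2.2)
  let g := fixed.count none
  (List.range (2 ^ g)).map (fun k0 =>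
    let st := ((s.zip fixed).reverse).foldl (fun (st : Nat × List (List Char)) cf =>
      match cf.2 with
      | some f => (st.1, st.2 ++ [[f]])
      | none => (st.1 / 2, st.2 ++ [if st.1 % 2 = 1 then [cf.1] else pvMapGet correction_map cf.1]))
      (k0, ([] : List (List Char)))
    String.mk st.2.reverse.flatten)

-- ===== PRECONDITION & SPEC =====
def Spec_ocr_combo_correction (input_str : String) (correction_map : List (String × String)) (out : List String) : Prop := out = ocr_combo_correction_alt input_str correction_map
instance (input_str : String) (correction_map : List (String × String)) (out : List String) : Decidable (Spec_ocr_combo_correction input_str correction_map out) := by unfold Spec_ocr_combo_correction; infer_instance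

-- ===== CLAIM (what is proved, stated in full; the proofs are below) =====
def Claim_equal_ocr_combo_correction : Prop := ∀ (input_str : String) (correction_map : List (String × String)), Dom_ocr_combo_correction input_str correction_map → Spec_ocr_combo_correction input_str correction_map (ocr_combo_correction input_str correction_map)

-- ===== LEMMAS AND PROOFS =====

def pvChoice (correction_map : List (String × String)) (prev : Option Char) (ch : Char) (nxt : Option Char) : List (List Char) :=
  if ch == '8' && (prev.any (fun p => PySem.Chars.upperChar p == 'T')) &&
     (nxt.any (fun q => PySem.Chars.upperChar q == 'D')) then [['B']]
  else if PySem.Chars.upperChar ch == 'B' && (prev.any (fun p => PySem.Chars.upperChar p == 'T')) &&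
     (nxt.any (fun q => PySem.Chars.upperChar q == 'D')) then [[ch]]
  else [pvMapGet correction_map ch, [ch]]

def pvHA (cm : List (String × String)) (s : List Char) (ic : Int × Char) : List (List Char) :=
  let i := ic.1
  let ch := ic.2
  if ch == '8' && decide (0 < i) && decide (i < (s.length : Int) - 1) then
    if PySem.Chars.upperChar (PySem.List.pyGetD s (i - 1) ' ') == 'T' &&
       PySem.Chars.upperChar (PySem.List.pyGetD s (i + 1) ' ') == 'D' then [['B']]
    else [pvMapGet cm ch, [ch]]
  else if PySem.Chars.upperChar ch == 'B' && decide (0 < i) && decide (i < (s.length : Int) - 1) then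
    if PySem.Chars.upperChar (PySem.List.pyGetD s (i - 1) ' ') == 'T' &&
       PySem.Chars.upperChar (PySem.List.pyGetD s (i + 1) ' ') == 'D' then [[ch]]
    else [pvMapGet cm ch, [ch]]
  else [pvMapGet cm ch, [ch]]

theorem pvHA_eq_choice (cm : List (String × String)) (pre rest : List Char) (c : Char) :
    pvHA cm (pre ++ c :: rest) ((pre.length : Int), c) = pvChoice cm pre.getLast? c rest.head? := by
  rcases List.eq_nil_or_concat pre with rfl | ⟨ps, p, rfl⟩
  · simp [pvHA, pvChoice]
  · cases rest with
    | nil =>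
      have hno : ¬ (((ps.length : Int)) + 1 < (ps.length : Int) + 2 - 1) := by omega
      simp [pvHA, pvChoice, hno]
    | cons r rs =>
      have harith : ((ps.length : Int)) + 1 < (ps.length : Int) + ((rs.length : Int) + 1 + 1 + 1) - 1 := by omega
      have e2' : PySem.List.pyGetD (ps ++ p :: c :: r :: rs) ((ps.length : Int) + 1 + 1) ' ' = r := by
        have hc : ((ps.length : Int)) + 1 + 1 = (((ps.length + 2 : Nat)) : Int) := by push_cast; ring
        rw [hc, PySem.List.pyGetD_natCast]
        have hl : ps ++ p :: c :: r :: rs = (ps ++ [p, c]) ++ r :: rs := by simp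
        rw [hl, List.getD_eq_getElem?_getD, List.getElem?_append_right (by simp)]
        simp
      have h8f : ¬ (PySem.Chars.upperChar '8' = 'B') := by decide
      by_cases h8 : c = '8'
      · subst h8
        simp [pvHA, pvChoice, harith, e2', h8f]
      · have h8' : (c == '8') = false := by simp [h8]
        by_cases hb : PySem.Chars.upperChar c = 'B'
        · simp [pvHA, pvChoice, harith, e2', h8', hb]
        · simp [pvHA, pvChoice, harith, e2', h8', hb]

def pvPoss (correction_map : List (String × String)) (prev : Option Char) : List Char → List (List (List Char))
  | [] => []
  | c :: rest => pvChoice correction_map prev c rest.head? :: pvPoss correction_map (some c) rest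

theorem pvPoss_eq (cm : List (String × String)) :
    ∀ (suf pre : List Char),
      (PySem.List.enumerate suf (pre.length : Int)).map (pvHA cm (pre ++ suf)) = pvPoss cm pre.getLast? suf := by
  intro suf
  induction suf with
  | nil => intro pre; simp [pvPoss, PySem.List.enumerate]
  | cons c rest ih =>
    intro pre
    rw [PySem.List.enumerate_cons, List.map_cons, pvHA_eq_choice]
    have h1 : ((pre.length : Int) + 1) = (((pre ++ [c]).length : Nat) : Int) := by simp
    have h2 : pre ++ c :: rest = (pre ++ [c]) ++ rest := by simp
    rw [pvPoss, h1, h2, ih (pre ++ [c])]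
    simp

def pvProd (ls : List (List (List Char))) : List (List Char) :=
  ls.foldr (fun choices acc => choices.flatMap (fun c => acc.map (fun r => c ++ r))) [[]]

theorem pvA_foldl_eq (cm : List (String × String)) (s : List Char) :
    ∀ (l : List (Int × Char)) (acc : List (List (List Char))),
      List.foldl (fun (poss : List (List (List Char))) (ic : Int × Char) =>
      let i := ic.1
      let ch := ic.2
      if ch == '8' && decide (0 < i) && decide (i < (s.length : Int) - 1) then
        if PySem.Chars.upperChar (PySem.List.pyGetD s (i - 1) ' ') == 'T' &&
           PySem.Chars.upperChar (PySem.List.pyGetD s (i + 1) ' ') == 'D' then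
          poss ++ [[['B']]]
        else poss ++ [[pvMapGet cm ch, [ch]]]
      else if PySem.Chars.upperChar ch == 'B' && decide (0 < i) && decide (i < (s.length : Int) - 1) then
        if PySem.Chars.upperChar (PySem.List.pyGetD s (i - 1) ' ') == 'T' &&
           PySem.Chars.upperChar (PySem.List.pyGetD s (i + 1) ' ') == 'D' then
          poss ++ [[[ch]]]
        else poss ++ [[pvMapGet cm ch, [ch]]]
      else poss ++ [[pvMapGet cm ch, [ch]]]) acc l = acc ++ l.map (pvHA cm s) := by
  intro l
  induction l with
  | nil => intro acc; simp
  | cons x xs ih =>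
    intro acc
    rw [List.foldl_cons, ih, List.map_cons,
        show pvHA cm s x :: xs.map (pvHA cm s) = [pvHA cm s x] ++ xs.map (pvHA cm s) from rfl,
        ← List.append_assoc]
    congr 1
    simp only [pvHA]
    split_ifs <;> rfl

-- ---- B-side machinery: fixed list, bit decoding ----

def pvFix : Option Char → List Char → List (Option Char)
  | _, [] => []
  | prev, c :: rest => pvFixOf prev c rest.head? :: pvFix (some c) rest

theorem pvZipFix : ∀ (s : List Char) (prev : Option Char),
    ((prev :: s.map some).zip (s.zip ((s.drop 1).map some ++ [none]))).map
      (fun t => pvFixOf t.1 t.2.1 t.2.2) = pvFix prev s := by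
  intro s
  induction s with
  | nil => intro prev; simp [pvFix]
  | cons c rest ih =>
    intro prev
    have hz : (c :: rest).zip (((c :: rest).drop 1).map some ++ [none]) =
        (c, rest.head?) :: rest.zip ((rest.drop 1).map some ++ [none]) := by
      cases rest <;> rfl
    rw [hz]
    show pvFixOf prev c rest.head? ::
        ((some c :: rest.map some).zip (rest.zip ((rest.drop 1).map some ++ [none]))).map
          (fun t => pvFixOf t.1 t.2.1 t.2.2) = pvFix prev (c :: rest)
    rw [ih (some c)]
    rfl

def pvChoiceOf (cm : List (String × String)) (cf : Char × Option Char) : List (List Char) :=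
  match cf.2 with
  | some f => [[f]]
  | none => [pvMapGet cm cf.1, [cf.1]]

theorem pvChoice_fix (cm : List (String × String)) (prev : Option Char) (c : Char) (nxt : Option Char) :
    pvChoice cm prev c nxt = pvChoiceOf cm (c, pvFixOf prev c nxt) := by
  by_cases h8 : c = '8'
  · subst h8
    by_cases hT : (prev.any (fun p => PySem.Chars.upperChar p == 'T')) = true <;>
      by_cases hD : (nxt.any (fun q => PySem.Chars.upperChar q == 'D')) = true <;>
        simp [pvChoice, pvChoiceOf, pvFixOf, hT, hD]
  · have h8' : (c == '8') = false := by simp [h8]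
    by_cases hT : (prev.any (fun p => PySem.Chars.upperChar p == 'T')) = true <;>
      by_cases hD : (nxt.any (fun q => PySem.Chars.upperChar q == 'D')) = true <;>
        by_cases hB : PySem.Chars.upperChar c = 'B' <;>
          simp [pvChoice, pvChoiceOf, pvFixOf, hT, hD, hB, h8']

theorem pvPoss_fix (cm : List (String × String)) :
    ∀ (s : List Char) (prev : Option Char),
      pvPoss cm prev s = (s.zip (pvFix prev s)).map (pvChoiceOf cm) := by
  intro s
  induction s with
  | nil => intro prev; simp [pvPoss, pvFix]
  | cons c rest ih =>
    intro prev
    show pvChoice cm prev c rest.head? :: pvPoss cm (some c) rest = _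
    rw [pvChoice_fix, ih (some c)]
    rfl

def pvGC (q : List (Char × Option Char)) : Nat := q.countP (fun cf => cf.2 == none)

theorem pvFix_count (s : List Char) : ∀ (prev : Option Char),
    (pvFix prev s).count none = pvGC (s.zip (pvFix prev s)) := by
  induction s with
  | nil => intro prev; simp [pvFix, pvGC]
  | cons c rest ih =>
    intro prev
    show (pvFixOf prev c rest.head? :: pvFix (some c) rest).count none =
      pvGC ((c, pvFixOf prev c rest.head?) :: rest.zip (pvFix (some c) rest))
    rw [List.count_cons]
    simp only [pvGC, List.countP_cons]
    rw [← pvGC, ← ih (some c)]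

def pvDecode (cm : List (String × String)) : List (Char × Option Char) → Nat → List (List Char)
  | [], _ => []
  | (_, some f) :: rest, k => [f] :: pvDecode cm rest k
  | (c, none) :: rest, k =>
      (if (k / 2 ^ pvGC rest) % 2 = 1 then [c] else pvMapGet cm c) :: pvDecode cm rest k

theorem pvFold_decode (cm : List (String × String)) :
    ∀ (q : List (Char × Option Char)) (k : Nat) (pieces : List (List Char)),
      (q.reverse.foldl (fun (st : Nat × List (List Char)) cf =>
        match cf.2 with
        | some f => (st.1, st.2 ++ [[f]])
        | none => (st.1 / 2, st.2 ++ [if st.1 % 2 = 1 then [cf.1] else pvMapGet cm cf.1]))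
        (k, pieces))
      = (k / 2 ^ pvGC q, pieces ++ (pvDecode cm q k).reverse) := by
  intro q
  induction q with
  | nil => intro k pieces; simp [pvGC, pvDecode]
  | cons cf rest ih =>
    intro k pieces
    rw [List.reverse_cons, List.foldl_append, ih k pieces, List.foldl_cons, List.foldl_nil]
    obtain ⟨c, f⟩ := cf
    cases f with
    | some f =>
      show (k / 2 ^ pvGC rest, (pieces ++ (pvDecode cm rest k).reverse) ++ [[f]]) = _
      have hg : pvGC ((c, some f) :: rest) = pvGC rest := by simp [pvGC, List.countP_cons]
      rw [hg]
      simp [pvDecode]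
    | none =>
      show (k / 2 ^ pvGC rest / 2,
        (pieces ++ (pvDecode cm rest k).reverse) ++
          [if k / 2 ^ pvGC rest % 2 = 1 then [c] else pvMapGet cm c]) = _
      have hg : pvGC ((c, none) :: rest) = pvGC rest + 1 := by simp [pvGC, List.countP_cons]
      rw [hg, pow_succ, ← Nat.div_div_eq_div_mul]
      simp [pvDecode]

theorem pvDecode_shift (cm : List (String × String)) :
    ∀ (q : List (Char × Option Char)) (k m : Nat),
      pvDecode cm q (k + 2 ^ pvGC q * m) = pvDecode cm q k := by
  intro q
  induction q with
  | nil => intro k m; rfl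
  | cons cf rest ih =>
    intro k m
    obtain ⟨c, f⟩ := cf
    cases f with
    | some f =>
      have hg : pvGC ((c, some f) :: rest) = pvGC rest := by simp [pvGC, List.countP_cons]
      show [f] :: pvDecode cm rest (k + 2 ^ pvGC ((c, some f) :: rest) * m) = [f] :: pvDecode cm rest k
      rw [hg, ih]
    | none =>
      have hg : pvGC ((c, none) :: rest) = pvGC rest + 1 := by simp [pvGC, List.countP_cons]
      have h2 : 2 ^ pvGC ((c, none) :: rest) * m = 2 ^ pvGC rest * (2 * m) := by
        rw [hg, pow_succ]; ring
      have hdiv : (k + 2 ^ pvGC rest * (2 * m)) / 2 ^ pvGC rest = k / 2 ^ pvGC rest + 2 * m :=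
        Nat.add_mul_div_left k (2 * m) (Nat.two_pow_pos _)
      show (if (k + 2 ^ pvGC ((c, none) :: rest) * m) / 2 ^ pvGC rest % 2 = 1 then [c] else pvMapGet cm c) ::
          pvDecode cm rest (k + 2 ^ pvGC ((c, none) :: rest) * m) = _
      rw [h2, hdiv, ih]
      have hmod : (k / 2 ^ pvGC rest + 2 * m) % 2 = k / 2 ^ pvGC rest % 2 := by omega
      rw [hmod]
      rfl

theorem pvProd_decode (cm : List (String × String)) :
    ∀ (q : List (Char × Option Char)),
      pvProd (q.map (pvChoiceOf cm)) = (List.range (2 ^ pvGC q)).map (fun k => (pvDecode cm q k).flatten) := by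
  intro q
  induction q with
  | nil => simp [pvProd, pvGC, pvDecode, List.range_succ]
  | cons cf rest ih =>
    obtain ⟨c, f⟩ := cf
    cases f with
    | some f =>
      have hg : pvGC ((c, some f) :: rest) = pvGC rest := by simp [pvGC, List.countP_cons]
      show pvProd (pvChoiceOf cm (c, some f) :: rest.map (pvChoiceOf cm)) = _
      rw [hg]
      have : pvProd (pvChoiceOf cm (c, some f) :: rest.map (pvChoiceOf cm)) =
          (pvProd (rest.map (pvChoiceOf cm))).map (fun r => [f] ++ r) := by
        simp [pvProd, pvChoiceOf]
      rw [this, ih, List.map_map]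
      apply List.map_congr_left
      intro k _
      simp [pvDecode]
    | none =>
      have hg : pvGC ((c, none) :: rest) = pvGC rest + 1 := by simp [pvGC, List.countP_cons]
      have hsplit : pvProd (pvChoiceOf cm (c, none) :: rest.map (pvChoiceOf cm)) =
          (pvProd (rest.map (pvChoiceOf cm))).map (fun r => pvMapGet cm c ++ r) ++
          (pvProd (rest.map (pvChoiceOf cm))).map (fun r => [c] ++ r) := by
        simp [pvProd, pvChoiceOf]
      show pvProd (pvChoiceOf cm (c, none) :: rest.map (pvChoiceOf cm)) = _
      rw [hsplit, ih, hg, pow_succ]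
      have h2T : 2 ^ pvGC rest * 2 = 2 ^ pvGC rest + 2 ^ pvGC rest := by ring
      rw [h2T, List.range_add, List.map_append, List.map_map, List.map_map]
      congr 1
      · apply List.map_congr_left
        intro k hk
        rw [List.mem_range] at hk
        have h0 : k / 2 ^ pvGC rest = 0 := Nat.div_eq_of_lt hk
        simp [pvDecode, h0]
      · rw [List.map_map]
        apply List.map_congr_left
        intro j hj
        rw [List.mem_range] at hj
        have h1 : (2 ^ pvGC rest + j) / 2 ^ pvGC rest = 1 := by
          rw [Nat.add_comm, Nat.add_div_right _ (Nat.two_pow_pos _),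
              Nat.div_eq_of_lt hj]
        have hsh : pvDecode cm rest (2 ^ pvGC rest + j) = pvDecode cm rest j := by
          have := pvDecode_shift cm rest j 1
          simpa [Nat.add_comm] using this
        simp [pvDecode, h1, hsh, Function.comp]

-- ===== VERDICT (by name: the statement is the Claim_ definition above) =====
theorem ocr_combo_correction_spec : Claim_equal_ocr_combo_correction := by
  intro input_str cm _
  unfold Spec_ocr_combo_correction ocr_combo_correction ocr_combo_correction_alt
  set s := PySem.Chars.replace input_str.toList "TDB".toList "TBD".toList with hs
  show (pvProd
      ((PySem.List.enumerate s 0).foldl (fun poss ic =>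
        let i := ic.1
        let ch := ic.2
        if ch == '8' && decide (0 < i) && decide (i < (s.length : Int) - 1) then
          if PySem.Chars.upperChar (PySem.List.pyGetD s (i - 1) ' ') == 'T' &&
             PySem.Chars.upperChar (PySem.List.pyGetD s (i + 1) ' ') == 'D' then
            poss ++ [[['B']]]
          else poss ++ [[pvMapGet cm ch, [ch]]]
        else if PySem.Chars.upperChar ch == 'B' && decide (0 < i) && decide (i < (s.length : Int) - 1) then
          if PySem.Chars.upperChar (PySem.List.pyGetD s (i - 1) ' ') == 'T' &&
             PySem.Chars.upperChar (PySem.List.pyGetD s (i + 1) ' ') == 'D' then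
            poss ++ [[[ch]]]
          else poss ++ [[pvMapGet cm ch, [ch]]]
        else poss ++ [[pvMapGet cm ch, [ch]]]) [])).map String.mk
    = (List.range (2 ^ (((none :: s.map some).zip (s.zip ((s.drop 1).map some ++ [none]))).map
          (fun t => pvFixOf t.1 t.2.1 t.2.2)).count none)).map (fun k0 =>
        String.mk ((((s.zip (((none :: s.map some).zip (s.zip ((s.drop 1).map some ++ [none]))).map
            (fun t => pvFixOf t.1 t.2.1 t.2.2))).reverse).foldl (fun (st : Nat × List (List Char)) cf =>
          match cf.2 with
          | some f => (st.1, st.2 ++ [[f]])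
          | none => (st.1 / 2, st.2 ++ [if st.1 % 2 = 1 then [cf.1] else pvMapGet cm cf.1]))
          (k0, ([] : List (List Char)))).2.reverse.flatten))
  rw [pvA_foldl_eq cm s (PySem.List.enumerate s 0) [], List.nil_append]
  have hposs := pvPoss_eq cm s []
  simp only [List.nil_append, List.length_nil, Nat.cast_zero, List.getLast?_nil] at hposs
  rw [pvZipFix s none, pvFix_count s none, hposs, pvPoss_fix cm s none,
      pvProd_decode cm (s.zip (pvFix none s)), List.map_map]
  apply List.map_congr_left
  intro k _
  rw [pvFold_decode cm (s.zip (pvFix none s)) k []]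
  simp
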